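-- pv_equiv track=rewrite | github.com/ellisra/advent-of-code | python/2025/day06.py | part_one
-- ===== SOURCE A (Python) =====
-- from math import prod
--
-- def part_one(data: str) -> int:
--     lines = data.splitlines()
--     operators = lines[-1].split()
--     digits = [line.split() for line in lines[:-1]]
--     nums = [list(map(int, col)) for col in zip(*digits)]
--
--     total = 0
--     for i, row in enumerate(nums):
--         if operators[i] == '+':
--             total += sum(row)
--         elif operators[i] == '*':
--             total += prod(row)
--
--     return total
-- ===== SOURCE B (Python) =====
-- def part_one(data: str) -> int:
--     *row_lines, op_line = data.splitlines()
--     cols = [(i, op, 0 if op == '+' else 1)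
--             for i, op in enumerate(op_line.split()) if op in ('+', '*')]
--     for line in row_lines:
--         row = line.split()
--         cols = [(i, op, acc + int(row[i]) if op == '+' else acc * int(row[i]))
--                 for i, op, acc in cols]
--     return sum(acc for _, _, acc in cols)
-- ===== Notes on version B (the rewrite author's own statement) =====
-- stated objective: alternative
-- what changed: Replaces transpose-then-reduce (zip(*rows) plus sum/prod per column) with a single row-major pass that threads one (index, operator, accumulator) record per '+'/'*' column and sums the accumulators; Pre_ excludes the inputs where A raises, tables with data rows where a '+'/'*' column lies beyond zip's truncation to the shortest row (A silently drops it, B's row indexing raises), and row-less tables with a '*' operator (A returns 0, B the empty product).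
-- outside the precondition, e.g. on part_one('1 2\n3\n+ *'): A returns 4, B raises IndexError; on part_one('1 2\n+ * +'): A returns 3, B raises IndexError; on part_one('+ *'): A returns 0, B returns 1
import Mathlib
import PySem

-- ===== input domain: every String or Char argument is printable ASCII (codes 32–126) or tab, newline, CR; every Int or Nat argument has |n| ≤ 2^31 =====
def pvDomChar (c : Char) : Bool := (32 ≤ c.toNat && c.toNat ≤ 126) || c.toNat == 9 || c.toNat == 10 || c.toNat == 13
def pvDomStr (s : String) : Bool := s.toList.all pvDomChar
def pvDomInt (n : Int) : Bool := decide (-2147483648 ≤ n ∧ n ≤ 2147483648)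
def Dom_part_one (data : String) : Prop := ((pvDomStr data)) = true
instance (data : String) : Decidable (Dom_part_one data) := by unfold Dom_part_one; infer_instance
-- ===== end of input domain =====

-- B replaces A's transpose-then-reduce (zip(*rows) + sum/prod per column) by a single
-- row-major pass threading one (index, operator, accumulator) record per '+'/'*' column.

-- ===== PORT A =====

-- zip(*digits): Python's zip over the unpacked rows — truncates to the shortest row.
-- Hand port (exact on this use): zip() of no iterables is empty; otherwise column i exists for
-- i < min(len(r) for r in rows), so r.getD never hits its default.
def pyZipStar (rows : List (List String)) : List (List String) :=
  match rows with
  | [] => []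
  | _ :: _ =>
    (List.range (PySem.List.minD (rows.map List.length) (fun x => x) 0)).map
      (fun i => rows.map (fun r => r.getD i ""))

def part_one (data : String) : Int :=
  let lines := PySem.Str.splitlines data
  -- lines[-1]: IndexError on empty data, excluded by Pre_
  let operators := PySem.Str.split₀ ((PySem.List.pyGet? lines (-1)).getD "")
  let digits := (PySem.List.slice lines none (some (-1))).map PySem.Str.split₀
  -- int(tok): ValueError excluded by Pre_
  let nums := (pyZipStar digits).map (fun col => col.map (fun s => (PySem.Int.ofStr? s).getD 0))
  (PySem.List.enumerate nums).foldl
    (fun total p =>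
      -- operators[i]: IndexError excluded by Pre_
      if PySem.List.pyGetD operators p.1 "" = "+" then total + p.2.sum
      else if PySem.List.pyGetD operators p.1 "" = "*" then total + p.2.prod
      else total) 0

-- ===== PORT B =====
def part_one_alt (data : String) : Int :=
  let lines := PySem.Str.splitlines data
  -- *row_lines, op_line = data.splitlines(): ValueError on empty data, excluded by Pre_
  let row_lines := lines.dropLast
  let op_line := (lines.getLast?).getD ""
  let cols0 := ((PySem.List.enumerate (PySem.Str.split₀ op_line)).filter
      (fun p => p.2 == "+" || p.2 == "*")).map
      (fun p => (p.1, p.2, if p.2 = "+" then (0 : Int) else 1))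
  let cols := row_lines.foldl
    (fun cs line =>
      let row := PySem.Str.split₀ line
      cs.map (fun t => (t.1, t.2.1,
        -- int(row[i]): IndexError / ValueError excluded by Pre_
        if t.2.1 = "+" then
          t.2.2 + (PySem.Int.ofStr? ((PySem.List.pyGet? row t.1).getD "")).getD 0
        else
          t.2.2 * (PySem.Int.ofStr? ((PySem.List.pyGet? row t.1).getD "")).getD 0)))
    cols0
  (cols.map (fun t => t.2.2)).sum

-- ===== PRECONDITION & SPEC =====
-- Pre_ excludes the inputs on which A raises (empty data: IndexError; more zip-truncated
-- columns than operators: IndexError; a non-integer token in a kept column: ValueError),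
-- the tables with data rows where some '+'/'*' operator column lies beyond zip's truncation
-- to the shortest row (A silently ignores that column, B's row indexing raises IndexError),
-- and the row-less tables with a '*' operator (A forms no columns and returns 0, B returns
-- the empty product 1 for that column — a defensible reading of an empty table).
def Pre_part_one (data : String) : Prop :=
  let lines := PySem.Str.splitlines data
  let rows := lines.dropLast.map PySem.Str.split₀
  let ops := PySem.Str.split₀ ((lines.getLast?).getD "")
  let ncols := PySem.List.minD (rows.map List.length) (fun x => x) 0
  lines ≠ [] ∧ ncols ≤ ops.length ∧
    (∀ r ∈ rows, ∀ j ∈ List.range ncols, (PySem.Int.ofStr? (r.getD j "")).isSome = true) ∧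
    (∀ j ∈ List.range ops.length,
      (ops.getD j "" = "*" → j < ncols) ∧ (ops.getD j "" = "+" → rows = [] ∨ j < ncols))
instance (data : String) : Decidable (Pre_part_one data) := by unfold Pre_part_one; infer_instance

def pvWitness_part_one : String := "1 2\n3 4\n+ *"

def Spec_part_one (data : String) (out : Int) : Prop := out = part_one_alt data
instance (data : String) (out : Int) : Decidable (Spec_part_one data out) := by unfold Spec_part_one; infer_instance

-- ===== CLAIM (what is proved, stated in full; the proofs are below) =====
def Claim_equal_part_one : Prop := ∀ (data : String), Dom_part_one data → Pre_part_one data → Spec_part_one data (part_one data)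

-- ===== LEMMAS AND PROOFS =====

-- A's loop over enumerate of a by-index list is the sum of per-index contributions.
lemma enum_foldl_range' {β : Type} (h2 : Int → β → Int) (c : Nat → β) :
    ∀ (n a : Nat) (t : Int),
      (PySem.List.enumerate ((List.range' a n).map c) (a : Int)).foldl
          (fun tot p => tot + h2 p.1 p.2) t
        = t + ((List.range' a n).map (fun (i : Nat) => h2 (i : Int) (c i))).sum := by
  intro n
  induction n with
  | zero => intro a t; simp
  | succ m ih =>
    intro a t
    rw [List.range'_succ]
    simp only [List.map_cons, PySem.List.enumerate_cons, List.foldl_cons, List.sum_cons]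
    have := ih (a + 1) (t + h2 (a : Int) (c a))
    push_cast at this ⊢
    rw [this]; ring

lemma enum_foldl_range {β : Type} (h2 : Int → β → Int) (c : Nat → β) (n : Nat) (t : Int) :
    (PySem.List.enumerate ((List.range n).map c)).foldl
        (fun tot p => tot + h2 p.1 p.2) t
      = t + ((List.range n).map (fun (i : Nat) => h2 (i : Int) (c i))).sum := by
  have := enum_foldl_range' h2 c n 0 t
  rw [List.range_eq_range']
  simpa using this

lemma pyZipStar_eq (rows : List (List String)) :
    pyZipStar rows
      = (List.range (PySem.List.minD (rows.map List.length) (fun x => x) 0)).map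
          (fun i => rows.map (fun r => r.getD i "")) := by
  cases rows with
  | nil => simp [pyZipStar, PySem.List.minD, PySem.List.min?]
  | cons r rs => rfl

-- a sum over range L collapses to range m when the tail terms vanish.
lemma sum_map_range_split (φ : Nat → Int) (m L : Nat) (h : m ≤ L)
    (h0 : ∀ j, m ≤ j → j < L → φ j = 0) :
    ((List.range L).map φ).sum = ((List.range m).map φ).sum := by
  rw [show L = m + (L - m) by omega, List.range_add, List.map_append, List.sum_append,
    List.map_map]
  have hz : ((List.range (L - m)).map (φ ∘ (fun j => m + j))).sum = 0 := by
    apply List.sum_eq_zero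
    intro x hx
    simp only [List.mem_map, List.mem_range, Function.comp_def] at hx
    obtain ⟨j, hj, rfl⟩ := hx
    exact h0 (m + j) (by omega) (by omega)
  rw [hz, add_zero]

-- B's row loop maps an elementwise update over the column records: pull the fold inside.
lemma foldl_map_pointwise {α β : Type} (f : β → α → α) :
    ∀ (rows : List β) (cs : List α),
      rows.foldl (fun cs r => cs.map (fun t => f r t)) cs
        = cs.map (fun t => rows.foldl (fun a r => f r a) t) := by
  intro rows
  induction rows with
  | nil => intro cs; simp
  | cons r rs ih =>
    intro cs
    simp only [List.foldl_cons, ih, List.map_map]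
    rfl

-- the per-record fold keeps index and operator fixed and folds the accumulator.
lemma foldl_keep {β : Type} (v : β → Int → Int) (rows : List β) :
    ∀ (t : Int × String × Int),
      rows.foldl (fun a r => (a.1, a.2.1,
          if a.2.1 = "+" then a.2.2 + v r a.1 else a.2.2 * v r a.1)) t
        = (t.1, t.2.1, rows.foldl (fun s r =>
            if t.2.1 = "+" then s + v r t.1 else s * v r t.1) t.2.2) := by
  induction rows with
  | nil => intro t; rfl
  | cons r rs ih =>
    intro t
    simp only [List.foldl_cons]
    rw [ih]

-- summing over a filtered list is summing the if-guarded terms over the whole list.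
lemma sum_map_filter {α : Type} (l : List α) (p : α → Bool) (g : α → Int) :
    ((l.filter p).map g).sum = (l.map (fun x => if p x then g x else 0)).sum := by
  induction l with
  | nil => rfl
  | cons x xs ih =>
    by_cases h : p x
    · simp [h, ih]
    · simp [h, ih]

-- ===== VERDICT (by name: the statement is the Claim_ definition above) =====
set_option maxHeartbeats 1000000 in
theorem part_one_spec : Claim_equal_part_one := by
  intro data _ hpre
  show part_one data = part_one_alt data
  unfold part_one part_one_alt
  simp only [PySem.List.pyGet?_neg_one, PySem.List.slice_to_neg_one]
  obtain ⟨-, hle, -, hact⟩ := hpre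
  set lines := PySem.Str.splitlines data with hlines
  set ops := PySem.Str.split₀ ((lines.getLast?).getD "") with hops
  set rows := lines.dropLast.map PySem.Str.split₀ with hrows
  set m := PySem.List.minD (rows.map List.length) (fun x => x) 0 with hm
  clear_value m rows ops lines
  -- A side
  rw [pyZipStar_eq, ← hm, List.map_map]
  have hfun : (fun (total : Int) (p : Int × List Int) =>
        if PySem.List.pyGetD ops p.1 "" = "+" then total + p.2.sum
        else if PySem.List.pyGetD ops p.1 "" = "*" then total + p.2.prod
        else total)
      = (fun total p => total +
          (if PySem.List.pyGetD ops p.1 "" = "+" then p.2.sum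
           else if PySem.List.pyGetD ops p.1 "" = "*" then p.2.prod
           else 0)) := by
    funext total p; split_ifs <;> simp
  rw [hfun]
  rw [enum_foldl_range
    (h2 := fun j col => if PySem.List.pyGetD ops j "" = "+" then col.sum
           else if PySem.List.pyGetD ops j "" = "*" then col.prod else (0 : Int))
    (c := (fun col => col.map (fun s => (PySem.Int.ofStr? s).getD 0)) ∘
          (fun i => rows.map (fun r => r.getD i "")))]
  -- B side
  rw [foldl_map_pointwise (f := fun line t => (t.1, t.2.1,
        if t.2.1 = "+" then
          t.2.2 + (PySem.Int.ofStr? ((PySem.List.pyGet? (PySem.Str.split₀ line) t.1).getD "")).getD 0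
        else
          t.2.2 * (PySem.Int.ofStr? ((PySem.List.pyGet? (PySem.Str.split₀ line) t.1).getD "")).getD 0))]
  simp only [List.map_map, Function.comp_def]
  simp only [foldl_keep (v := fun line i =>
      (PySem.Int.ofStr? ((PySem.List.pyGet? (PySem.Str.split₀ line) i).getD "")).getD 0)]
  rw [sum_map_filter]
  rw [PySem.List.enumerate_eq_map_pyRange ops ""]
  simp only [PySem.List.len_eq, PySem.List.pyRange_zero_nat, List.map_map, Function.comp_def]
  simp only [zero_add]
  -- drop the operator columns beyond the zip truncation: they contribute 0
  rw [sum_map_range_split _ m ops.length hle]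
  -- the surviving columns agree termwise
  · apply congrArg List.sum
    apply List.map_congr_left
    intro j hj
    simp only [PySem.List.pyGetD_natCast, PySem.List.pyGet?_natCast]
    by_cases hplus : ops.getD j "" = "+"
    · have hadd := PySem.List.foldl_add lines.dropLast
        (fun line => (PySem.Int.ofStr? ((PySem.Str.split₀ line)[j]?.getD "")).getD 0) 0
      simp only [hplus, if_pos, hrows, List.map_map, Function.comp_def,
        List.getD_eq_getElem?_getD, hadd, zero_add]
      simp
    · by_cases hmul : ops.getD j "" = "*"
      · have hprod : ((lines.dropLast.map
              (fun line => (PySem.Int.ofStr? ((PySem.Str.split₀ line)[j]?.getD "")).getD 0)).prod : Int)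
            = lines.dropLast.foldl
                (fun s line => s * (PySem.Int.ofStr? ((PySem.Str.split₀ line)[j]?.getD "")).getD 0) 1 := by
          rw [List.prod_eq_foldl, List.foldl_map]
        simp only [hmul, hrows, List.map_map, Function.comp_def,
          List.getD_eq_getElem?_getD]
        rw [List.map_dropLast] at hprod
        simpa using hprod
      · rw [List.getD_eq_getElem?_getD] at hplus hmul
        simp [hplus, hmul]
  -- the vanishing condition for the dropped columns
  · intro j hmj hjL
    obtain ⟨hstar, hplusc⟩ := hact j (List.mem_range.mpr hjL)
    simp only [List.getD_eq_getElem?_getD] at hstar hplusc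
    simp only [PySem.List.pyGetD_natCast, beq_iff_eq, Bool.or_eq_true,
      List.getD_eq_getElem?_getD]
    by_cases hp : ops[j]?.getD "" = "+"
    · have hrownil : lines.dropLast = [] := by
        rcases hplusc hp with h | h
        · rw [hrows] at h; exact List.map_eq_nil_iff.mp h
        · omega
      rw [if_pos (Or.inl hp), hrownil]
      simp [hp]
    · by_cases hs : ops[j]?.getD "" = "*"
      · exact absurd (hstar hs) (by omega)
      · rw [if_neg]
        rintro (h | h) <;> contradiction
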